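-- pv_equiv track=rewrite | github.com/jeurtr/Spark | road_etl.py | road_filter
-- ===== SOURCE A (Python) =====
-- road_index = 13            # 道路字段
--
-- jm_load_id = 1   # 道路id定义
--
-- def road_filter(grouped_row):
--     """根据3个连续在jm达到上过滤相应数据
--     99%的数据都会被过滤掉"""
--     row = list(grouped_row[1])    # 二维数组
--     continue_road_cnt, continue_road_max = 0, 0
--     for i in row:
--         if i[road_index] == jm_load_id:
--             continue_road_cnt += 1
--         else:
--             continue_road_cnt = 0
--
--         if continue_road_cnt > continue_road_max:
--             continue_road_max = continue_road_cnt
--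
--     return continue_road_max > 2
-- ===== SOURCE B (Python) =====
-- road_index = 13            # 道路字段
--
-- jm_load_id = 1   # 道路id定义
--
-- def road_filter(grouped_row):
--     """True iff 3 consecutive rows all have road id jm_load_id: compute the
--     per-row hit flags once, then check every length-3 window by zipping the
--     flag list with its two shifts (no running counter/maximum)."""
--     hits = [r[road_index] == jm_load_id for r in grouped_row[1]]
--     return any(a and b and c for a, b, c in zip(hits, hits[1:], hits[2:]))
-- ===== Notes on version B (the rewrite author's own statement) =====
-- stated objective: simpler
-- what changed: Replaces the running-counter/running-maximum fold with a precomputed per-row hit-flag list and an any() over all length-3 windows obtained by zipping that list with its two shifts, eliminating both accumulators.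
import Mathlib
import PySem

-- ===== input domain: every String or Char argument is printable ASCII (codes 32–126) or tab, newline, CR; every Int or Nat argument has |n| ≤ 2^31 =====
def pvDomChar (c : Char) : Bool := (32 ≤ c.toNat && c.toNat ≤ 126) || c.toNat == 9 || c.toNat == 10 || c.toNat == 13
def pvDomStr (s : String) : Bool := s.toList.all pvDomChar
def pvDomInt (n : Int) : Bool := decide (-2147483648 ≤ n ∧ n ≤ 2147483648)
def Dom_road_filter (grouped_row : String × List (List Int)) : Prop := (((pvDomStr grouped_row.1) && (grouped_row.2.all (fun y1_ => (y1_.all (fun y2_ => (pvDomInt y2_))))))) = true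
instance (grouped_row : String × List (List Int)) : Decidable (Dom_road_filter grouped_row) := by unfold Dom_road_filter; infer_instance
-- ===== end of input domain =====

-- B replaces A's running-counter/running-maximum fold by an any() over all length-3
-- windows (zip of the row list with its two shifts); same return value on Pre_.

-- ===== PORT A =====
def road_filter (grouped_row : String × List (List Int)) : Bool :=
  let row := grouped_row.2
  let st := row.foldl
    (fun (s : Int × Int) (i : List Int) =>
      let cnt : Int := if PySem.List.pyGet? i 13 == some 1 then s.1 + 1 else 0
      let mx : Int := if cnt > s.2 then cnt else s.2
      (cnt, mx))
    (0, 0)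
  st.2 > 2

-- ===== PORT B =====
def road_filter_alt (grouped_row : String × List (List Int)) : Bool :=
  let hits := grouped_row.2.map (fun r => PySem.List.pyGet? r 13 == some 1)
  ((hits.zip (PySem.List.slice hits (some 1) none)).zip (PySem.List.slice hits (some 2) none)).any
    (fun p => p.1.1 && p.1.2 && p.2)

-- ===== PRECONDITION & SPEC =====
-- Pre_ excludes exactly the inputs on which A raises IndexError: some row shorter than 14.
def Pre_road_filter (grouped_row : String × List (List Int)) : Prop :=
  ∀ r ∈ grouped_row.2, 14 ≤ r.length
instance (grouped_row : String × List (List Int)) : Decidable (Pre_road_filter grouped_row) := by unfold Pre_road_filter; infer_instance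

def pvWitness_road_filter : (String × List (List Int)) :=
  ("x", [[1,1,1,1,1,1,1,1,1,1,1,1,1,1], [0,0,0,0,0,0,0,0,0,0,0,0,0,1]])

def Spec_road_filter (grouped_row : String × List (List Int)) (out : Bool) : Prop := out = road_filter_alt grouped_row
instance (grouped_row : String × List (List Int)) (out : Bool) : Decidable (Spec_road_filter grouped_row out) := by unfold Spec_road_filter; infer_instance

-- ===== CLAIM (what is proved, stated in full; the proofs are below) =====
def Claim_equal_road_filter : Prop := ∀ (grouped_row : String × List (List Int)), Dom_road_filter grouped_row → Pre_road_filter grouped_row → Spec_road_filter grouped_row (road_filter grouped_row)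

-- ===== LEMMAS AND PROOFS =====

-- the per-row predicate both programs test
def pvP (r : List Int) : Bool := PySem.List.pyGet? r 13 == some 1

-- recursive "has a window of three consecutive true bits"
def pvWin3 : List Bool → Bool
  | a :: b :: c :: t => (a && b && c) || pvWin3 (b :: c :: t)
  | _ => false

-- mirror of A's fold, without the max accumulator
def pvAux : Int → List Bool → Bool
  | _, [] => false
  | c, b :: t => if b then (decide (c + 1 > 2) || pvAux (c + 1) t) else pvAux 0 t

theorem pvFold_char (row : List (List Int)) : ∀ (c m : Int), 0 ≤ c → 0 ≤ m →
    (decide ((row.foldl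
      (fun (s : Int × Int) (i : List Int) =>
        let cnt : Int := if PySem.List.pyGet? i 13 == some 1 then s.1 + 1 else 0
        let mx : Int := if cnt > s.2 then cnt else s.2
        (cnt, mx))
      (c, m)).2 > 2)) = (decide (m > 2) || pvAux c (row.map pvP)) := by
  induction row with
  | nil => intro c m hc hm; simp [pvAux]
  | cons h t ih =>
    intro c m hc hm
    by_cases hp : PySem.List.pyGet? h 13 == some 1
    · simp only [List.foldl_cons, List.map_cons, pvAux, pvP, hp, if_pos]
      rw [ih (c + 1) (if c + 1 > m then c + 1 else m) (by omega) (by split <;> omega)]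
      have key : decide ((if c + 1 > m then c + 1 else m) > 2)
          = (decide (m > 2) || decide (c + 1 > 2)) := by
        rw [← Bool.decide_or]
        apply decide_eq_decide.mpr
        split <;> omega
      rw [key, Bool.or_assoc]
    · simp only [List.foldl_cons, List.map_cons, pvAux, pvP, hp, Bool.false_eq_true, if_false]
      rw [ih 0 (if (0:Int) > m then 0 else m) le_rfl (by split <;> omega)]
      have key : (if (0:Int) > m then (0:Int) else m) = m := by split <;> omega
      rw [key]

theorem pvWin3_cons_false (t : List Bool) : pvWin3 (false :: t) = pvWin3 t := by
  match t with
  | [] => rfl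
  | [x] => rfl
  | x :: y :: r => simp [pvWin3]

theorem pvWin3_tf (t : List Bool) : pvWin3 (true :: false :: t) = pvWin3 t := by
  match t with
  | [] => rfl
  | x :: r => simp [pvWin3, pvWin3_cons_false]

theorem pvWin3_ttf (t : List Bool) : pvWin3 (true :: true :: false :: t) = pvWin3 t := by
  simp [pvWin3, pvWin3_tf]

theorem pvAux_char (bs : List Bool) : ∀ (c : Int), 0 ≤ c →
    pvAux c bs = pvWin3 (List.replicate (min c 2).toNat true ++ bs) := by
  induction bs with
  | nil =>
    intro c hc
    rcases (by omega : (min c 2).toNat = 0 ∨ (min c 2).toNat = 1 ∨ (min c 2).toNat = 2) with h | h | h <;>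
      simp [pvAux, h, List.replicate, pvWin3]
  | cons b t ih =>
    intro c hc
    cases b with
    | false =>
      have h0 := ih 0 le_rfl
      simp only [pvAux, if_neg Bool.false_ne_true, h0]
      rcases (by omega : (min c 2).toNat = 0 ∨ (min c 2).toNat = 1 ∨ (min c 2).toNat = 2) with h | h | h <;>
        simp [h, List.replicate, pvWin3_cons_false, pvWin3_tf, pvWin3_ttf]
    | true =>
      have h1 := ih (c + 1) (by omega)
      simp only [pvAux, h1]
      rcases (by omega : c = 0 ∨ c = 1 ∨ 2 ≤ c) with h | h | h
      · subst h; simp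
      · subst h
        simp [List.replicate]
      · have e1 : (min c 2).toNat = 2 := by omega
        have e2 : (min (c + 1) 2).toNat = 2 := by omega
        simp [e1, e2, List.replicate, pvWin3, (by omega : c + 1 > 2)]

theorem pvZip_char : ∀ (bs : List Bool),
    ((bs.zip (bs.drop 1)).zip (bs.drop 2)).any
      (fun p => p.1.1 && p.1.2 && p.2) = pvWin3 bs
  | [] => rfl
  | [a] => rfl
  | [a, b] => rfl
  | a :: b :: c :: t => by
    have ih := pvZip_char (b :: c :: t)
    simp only [List.drop_succ_cons, List.drop_zero] at ih ⊢
    rw [List.zip_cons_cons, List.zip_cons_cons, List.any_cons, ih]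
    simp [pvWin3]

-- ===== VERDICT (by name: the statement is the Claim_ definition above) =====
theorem road_filter_spec : Claim_equal_road_filter := by
  intro g _ _
  show road_filter g = road_filter_alt g
  simp only [road_filter, road_filter_alt]
  rw [PySem.List.slice_from (g.2.map _) (by norm_num : (0:Int) ≤ 1),
      PySem.List.slice_from (g.2.map _) (by norm_num : (0:Int) ≤ 2)]
  have hf := pvFold_char g.2 0 0 le_rfl le_rfl
  rw [pvAux_char _ 0 le_rfl] at hf
  simp only [show (min (0:Int) 2).toNat = 0 from rfl, List.replicate, List.nil_append] at hf
  simp only [show ((1:Int)).toNat = 1 from rfl, show ((2:Int)).toNat = 2 from rfl]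
  rw [pvZip_char]
  exact hf
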